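-- pv_equiv track=rewrite | github.com/swerik-project/scripts | src/train_split_model.py | get_split_characters
-- ===== SOURCE A (Python) =====
-- def get_split_characters(sequence):
--     split_chars = []
--     split_sequence_list = sequence.split('[SPLIT]')
--     if len(split_sequence_list) != 1:
--         n_chars = 0
--         for i, sub_sequence in enumerate(split_sequence_list):
--             if n_chars != 0:
--                 split_chars.append(n_chars)
--             n_chars += len(sub_sequence)
--     return split_chars
-- ===== SOURCE B (Python) =====
-- def get_split_characters(sequence):
--     out = []
--     pos = 0
--     rest = sequence
--     while True:
--         idx = rest.find('[SPLIT]')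
--         if idx == -1:
--             return out
--         pos += idx
--         if pos != 0:
--             out.append(pos)
--         rest = rest[idx + 7:]
-- ===== Notes on version B (the rewrite author's own statement) =====
-- stated objective: alternative
-- what changed: B never builds the list of split pieces: it scans with repeated str.find of the 7-char marker over a shrinking suffix, maintaining a running payload-position accumulator and appending it (when nonzero) once per marker, instead of A's enumerate-and-sum over the piece list produced by str.split.
import Mathlib
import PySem

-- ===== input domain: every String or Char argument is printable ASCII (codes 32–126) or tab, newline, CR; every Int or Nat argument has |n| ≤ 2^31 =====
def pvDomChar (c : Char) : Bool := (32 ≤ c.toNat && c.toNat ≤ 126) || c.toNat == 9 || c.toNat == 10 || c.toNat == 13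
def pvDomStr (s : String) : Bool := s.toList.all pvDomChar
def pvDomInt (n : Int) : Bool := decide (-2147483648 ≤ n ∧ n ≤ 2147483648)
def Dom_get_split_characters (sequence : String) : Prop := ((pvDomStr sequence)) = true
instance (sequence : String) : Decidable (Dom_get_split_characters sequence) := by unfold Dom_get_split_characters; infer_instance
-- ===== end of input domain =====

-- B scans the string with repeated find('[SPLIT]') over a shrinking suffix and a running
-- position accumulator, instead of A's enumerate-and-sum over the split piece list (alternative).

-- ===== PORT A =====
-- sequence.split('[SPLIT]') with a nonempty literal separator is exactly Chars.splitOn on code points.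
def get_split_characters (sequence : String) : List Int :=
  let split_sequence_list := PySem.Chars.splitOn sequence.toList ("[SPLIT]".toList)
  if split_sequence_list.length ≠ 1 then
    ((PySem.List.enumerate split_sequence_list).foldl
      (fun (st : List Int × Int) (p : Int × List Char) =>
        ((if st.2 ≠ 0 then st.1 ++ [st.2] else st.1), st.2 + (PySem.Chars.len p.2 : Int)))
      (([] : List Int), (0 : Int))).1
  else []

-- ===== PORT B =====
-- an occurrence of a nonempty pattern found at idx ≥ 0 ends within the string
theorem pvFindOcc (l sub : List Char) (_hsub : sub ≠ [])
    (h : PySem.Chars.find l sub ≠ -1) :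
    0 ≤ PySem.Chars.find l sub ∧ (PySem.Chars.find l sub).toNat + sub.length ≤ l.length := by
  have h0 : 0 ≤ PySem.Chars.find l sub := by
    have := PySem.Chars.neg_one_le_find l sub; omega
  refine ⟨h0, ?_⟩
  have hsp := (PySem.Chars.find_spec h0).1
  have hlen := hsp.length_le
  have hle := PySem.Chars.find_le_length l sub
  simp [List.length_drop] at hlen
  omega

-- the while loop of Source B: rest is the unscanned suffix, pos the running payload position
def pvAltGo (rest : List Char) (pos : Int) (out : List Int) : List Int :=
  let idx := PySem.Chars.find rest ("[SPLIT]".toList)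
  if h : idx = -1 then out
  else
    let pos' := pos + idx
    pvAltGo (PySem.Chars.slice rest (some (idx + 7)) none) pos'
      (if pos' ≠ 0 then out ++ [pos'] else out)
termination_by rest.length
decreasing_by
  have hocc := pvFindOcc rest ("[SPLIT]".toList) (by decide) h
  have h7 : ("[SPLIT]".toList).length = 7 := by decide
  have hsl := PySem.List.slice_from rest
    (a := PySem.Chars.find rest ("[SPLIT]".toList) + 7) (by omega)
  simp only [PySem.Chars.slice_eq_listSlice, hsl, List.length_drop]
  omega

def get_split_characters_alt (sequence : String) : List Int :=
  pvAltGo sequence.toList 0 []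

-- ===== PRECONDITION & SPEC =====
def Spec_get_split_characters (sequence : String) (out : List Int) : Prop := out = get_split_characters_alt sequence
instance (sequence : String) (out : List Int) : Decidable (Spec_get_split_characters sequence out) := by unfold Spec_get_split_characters; infer_instance

-- ===== CLAIM (what is proved, stated in full; the proofs are below) =====
def Claim_equal_get_split_characters : Prop := ∀ (sequence : String), Dom_get_split_characters sequence → Spec_get_split_characters sequence (get_split_characters sequence)

-- ===== LEMMAS AND PROOFS =====

-- the separator, shielded from simp's string-literal normalization
def pvSEP : List Char := "[SPLIT]".toList

theorem pvSEP_eq : "[SPLIT]".toList = pvSEP := rfl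

theorem pvSEP_ne : pvSEP ≠ [] := by decide

theorem pvSEP_len : pvSEP.length = 7 := by decide

-- the split pieces of (pre ++ l) where pre is already scanned and marker-free
def pvPieces (l : List Char) (pre : List Char) : List (List Char) :=
  let i := PySem.Chars.find l pvSEP
  if h : i = -1 then [pre ++ l]
  else (pre ++ l.take i.toNat) :: pvPieces (l.drop (i.toNat + 7)) []
termination_by l.length
decreasing_by
  have hocc := pvFindOcc l pvSEP pvSEP_ne h
  have h7 := pvSEP_len
  simp only [List.length_drop]
  omega

theorem pvPieces_eq_no (l pre : List Char) (h : PySem.Chars.find l pvSEP = -1) :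
    pvPieces l pre = [pre ++ l] := by
  rw [pvPieces]; exact dif_pos h

theorem pvPieces_eq_yes (l pre : List Char) (h : PySem.Chars.find l pvSEP ≠ -1) :
    pvPieces l pre = (pre ++ l.take (PySem.Chars.find l pvSEP).toNat)
      :: pvPieces (l.drop ((PySem.Chars.find l pvSEP).toNat + 7)) [] := by
  rw [pvPieces]; exact dif_neg h

theorem pvPieces_ne_nil (l pre : List Char) : pvPieces l pre ≠ [] := by
  by_cases h : PySem.Chars.find l pvSEP = -1
  · rw [pvPieces_eq_no l pre h]; simp
  · rw [pvPieces_eq_yes l pre h]; simp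

-- A's cumulative positions over a piece list, starting from n
def pvPos : List (List Char) → Int → List Int
  | [], _ => []
  | p :: ps, n => (if n ≠ 0 then [n] else []) ++ pvPos ps (n + p.length)

-- B's positions over a piece list: one entry per marker (i.e. per gap between pieces)
def pvB : List (List Char) → Int → List Int
  | [], _ => []
  | [_], _ => []
  | p :: q :: qs, n =>
      (if n + (p.length : Int) ≠ 0 then [n + (p.length : Int)] else []) ++ pvB (q :: qs) (n + p.length)

theorem pvFind_nil (sub : List Char) (hsub : sub ≠ []) : PySem.Chars.find [] sub = -1 := by
  rw [PySem.Chars.find_eq_neg_one_iff]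
  intro hinf
  exact hsub (List.eq_nil_of_infix_nil hinf)

theorem pvFind_cons_of_prefix {sub : List Char} {c : Char} {rest : List Char}
    (h : sub <+: (c :: rest)) :
    PySem.Chars.find (c :: rest) sub = 0 := by
  have h0 : 0 ≤ PySem.Chars.find (c :: rest) sub :=
    (PySem.Chars.find_nonneg_iff _ _).mpr h.isInfix
  obtain ⟨hp, hmin⟩ := PySem.Chars.find_spec h0
  by_cases hz : (PySem.Chars.find (c :: rest) sub).toNat = 0
  · omega
  · exact absurd h (by simpa using hmin 0 (by omega))

theorem pvFind_cons_of_not_prefix {sub : List Char} {c : Char} {rest : List Char}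
    (hn : ¬ sub <+: (c :: rest)) :
    PySem.Chars.find (c :: rest) sub
      = if PySem.Chars.find rest sub = -1 then -1
        else PySem.Chars.find rest sub + 1 := by
  by_cases hr : PySem.Chars.find rest sub = -1
  · rw [if_pos hr]
    rw [PySem.Chars.find_eq_neg_one_iff]
    rw [List.infix_cons_iff]
    rintro (hc | hc)
    · exact hn hc
    · exact (PySem.Chars.find_eq_neg_one_iff _ _).mp hr hc
  · have hr0 : 0 ≤ PySem.Chars.find rest sub := by
      have := PySem.Chars.neg_one_le_find rest sub; omega
    obtain ⟨hrp, hrmin⟩ := PySem.Chars.find_spec hr0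
    have hf0 : 0 ≤ PySem.Chars.find (c :: rest) sub := by
      rw [PySem.Chars.find_nonneg_iff]
      rw [List.infix_cons_iff]
      exact Or.inr ((PySem.Chars.find_nonneg_iff _ _).mp hr0)
    obtain ⟨hfp, hfmin⟩ := PySem.Chars.find_spec hf0
    set f := PySem.Chars.find (c :: rest) sub with hfdef
    set r := PySem.Chars.find rest sub with hrdef
    have hfz : f.toNat ≠ 0 := by
      intro hz
      rw [hz] at hfp
      exact hn (by simpa using hfp)
    have hupper : f.toNat ≤ r.toNat + 1 := by
      by_contra hlt
      exact (hfmin (r.toNat + 1) (by omega)) (by simpa using hrp)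
    have hlower : r.toNat ≤ f.toNat - 1 := by
      by_contra hlt
      have hocc : sub <+: List.drop (f.toNat - 1) rest := by
        have hdrop : List.drop f.toNat (c :: rest) = List.drop (f.toNat - 1) rest := by
          obtain ⟨k, hk⟩ : ∃ k, f.toNat = k + 1 := ⟨f.toNat - 1, by omega⟩
          rw [hk]; simp
        rwa [hdrop] at hfp
      exact (hrmin (f.toNat - 1) (by omega)) hocc
    rw [if_neg hr]
    omega

theorem pvPieces_cons_of_not_prefix {c : Char} {rest pre : List Char}
    (hn : ¬ pvSEP <+: (c :: rest)) :
    pvPieces (c :: rest) pre = pvPieces rest (pre ++ [c]) := by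
  have hstep := pvFind_cons_of_not_prefix (sub := pvSEP) hn
  by_cases hr : PySem.Chars.find rest pvSEP = -1
  · rw [if_pos hr] at hstep
    rw [pvPieces_eq_no _ _ hstep, pvPieces_eq_no _ _ hr]
    simp
  · rw [if_neg hr] at hstep
    have hr0 : 0 ≤ PySem.Chars.find rest pvSEP := by
      have := PySem.Chars.neg_one_le_find rest pvSEP; omega
    rw [pvPieces_eq_yes _ _ (by rw [hstep]; omega), pvPieces_eq_yes _ _ hr]
    rw [hstep]
    have htn : (PySem.Chars.find rest pvSEP + 1).toNat
        = (PySem.Chars.find rest pvSEP).toNat + 1 := by omega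
    rw [htn]
    simp [List.take_succ_cons, List.drop_succ_cons]

theorem pvGo_eq_pieces : ∀ (fuel : Nat) (l cur : List Char) (acc : List (List Char)),
    l.length < fuel →
    PySem.Chars.splitOn.go pvSEP fuel l cur acc
      = acc.reverse ++ pvPieces l cur.reverse := by
  intro fuel
  induction fuel with
  | zero => intro l cur acc h; omega
  | succ n ih =>
    intro l cur acc h
    match l with
    | [] =>
      rw [show PySem.Chars.splitOn.go pvSEP (n+1) [] cur acc
            = (cur.reverse :: acc).reverse by simp [PySem.Chars.splitOn.go]]
      rw [pvPieces_eq_no _ _ (pvFind_nil pvSEP pvSEP_ne)]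
      simp
    | c :: rest =>
      by_cases hp : pvSEP.isPrefixOf (c :: rest) = true
      · have hpre : pvSEP <+: (c :: rest) := List.isPrefixOf_iff_prefix.mp hp
        rw [show PySem.Chars.splitOn.go pvSEP (n+1) (c :: rest) cur acc
              = PySem.Chars.splitOn.go pvSEP n
                  (List.drop pvSEP.length (c :: rest)) [] (cur.reverse :: acc) by
              rw [PySem.Chars.splitOn.go]; simp [hp]]
        have hlen7 : 7 ≤ (c :: rest).length := by
          have := hpre.length_le
          rw [pvSEP_len] at this
          exact this
        rw [pvSEP_len]
        rw [ih (List.drop 7 (c :: rest)) [] _ (by simp at h ⊢; omega)]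
        have hfind := pvFind_cons_of_prefix hpre
        rw [pvPieces_eq_yes (c :: rest) cur.reverse (by rw [hfind]; omega)]
        rw [hfind]
        simp
      · have hnp : ¬ pvSEP <+: (c :: rest) := by
          rw [← List.isPrefixOf_iff_prefix]; simpa using hp
        rw [show PySem.Chars.splitOn.go pvSEP (n+1) (c :: rest) cur acc
              = PySem.Chars.splitOn.go pvSEP n rest (c :: cur) acc by
              rw [PySem.Chars.splitOn.go]; simp [hp]]
        rw [ih _ _ _ (by simp at h ⊢; omega)]
        rw [pvPieces_cons_of_not_prefix hnp]
        simp

theorem pvSplitOn_eq_pieces (s : List Char) :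
    PySem.Chars.splitOn s pvSEP = pvPieces s [] := by
  rw [PySem.Chars.splitOn, pvGo_eq_pieces (s.length + 1) s [] [] (by omega)]
  simp

theorem pvFoldA : ∀ (ps : List (List Char)) (i : Int) (acc : List Int) (n : Int),
    ((PySem.List.enumerate ps i).foldl
      (fun (st : List Int × Int) (p : Int × List Char) =>
        ((if st.2 ≠ 0 then st.1 ++ [st.2] else st.1), st.2 + (PySem.Chars.len p.2 : Int)))
      (acc, n)).1 = acc ++ pvPos ps n := by
  intro ps
  induction ps with
  | nil => intro i acc n; simp [PySem.List.enumerate_nil, pvPos]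
  | cons p ps ih =>
    intro i acc n
    rw [PySem.List.enumerate_cons, List.foldl_cons, ih]
    simp only [pvPos, PySem.Chars.len_eq]
    split_ifs <;> simp

theorem pvPos_eq_pvB : ∀ (ps : List (List Char)) (p : List Char) (n : Int),
    pvPos (p :: ps) n = (if n ≠ 0 then [n] else []) ++ pvB (p :: ps) n := by
  intro ps
  induction ps with
  | nil => intro p n; simp [pvPos, pvB]
  | cons q qs ih =>
    intro p n
    rw [show pvPos (p :: q :: qs) n
          = (if n ≠ 0 then [n] else []) ++ pvPos (q :: qs) (n + p.length) from rfl]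
    rw [ih, pvB]

theorem pvPos_zero_eq_pvB (ps : List (List Char)) : pvPos ps 0 = pvB ps 0 := by
  match ps with
  | [] => rfl
  | p :: ps => rw [pvPos_eq_pvB]; simp

theorem pvAltGo_eq_aux : ∀ (fuel : Nat) (rest : List Char), rest.length ≤ fuel →
    ∀ (pos : Int) (out : List Int),
    pvAltGo rest pos out = out ++ pvB (pvPieces rest []) pos := by
  intro fuel
  induction fuel with
  | zero =>
    intro rest hf pos out
    have hnil : rest = [] := List.eq_nil_of_length_eq_zero (by omega)
    subst hnil
    rw [pvAltGo]
    simp only [pvSEP_eq]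
    rw [dif_pos (pvFind_nil pvSEP pvSEP_ne)]
    rw [pvPieces_eq_no _ _ (pvFind_nil pvSEP pvSEP_ne)]
    simp [pvB]
  | succ n ih =>
    intro rest hf pos out
    rw [pvAltGo]
    simp only [pvSEP_eq]
    by_cases h : PySem.Chars.find rest pvSEP = -1
    · rw [dif_pos h, pvPieces_eq_no _ _ h]
      simp [pvB]
    · have hocc := pvFindOcc rest pvSEP pvSEP_ne h
      rw [pvSEP_len] at hocc
      rw [dif_neg h, pvPieces_eq_yes _ _ h]
      obtain ⟨q, qs, hqs⟩ := List.exists_cons_of_ne_nil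
        (pvPieces_ne_nil (rest.drop ((PySem.Chars.find rest pvSEP).toNat + 7)) [])
      rw [hqs]
      have hsl := PySem.List.slice_from rest
        (a := PySem.Chars.find rest pvSEP + 7) (by omega)
      simp only [PySem.Chars.slice_eq_listSlice, hsl]
      have htn : (PySem.Chars.find rest pvSEP + 7).toNat
          = (PySem.Chars.find rest pvSEP).toNat + 7 := by omega
      rw [htn]
      rw [ih _ (by simp only [List.length_drop]; omega)]
      rw [hqs]
      simp only [pvB, List.nil_append, List.length_take]
      have hlen : min (PySem.Chars.find rest pvSEP).toNat rest.length
          = (PySem.Chars.find rest pvSEP).toNat := by omega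
      rw [hlen]
      have hcast : pos + PySem.Chars.find rest pvSEP
          = pos + ((PySem.Chars.find rest pvSEP).toNat : Int) := by omega
      rw [hcast]
      split_ifs <;> simp

theorem pvAltGo_eq (rest : List Char) (pos : Int) (out : List Int) :
    pvAltGo rest pos out = out ++ pvB (pvPieces rest []) pos :=
  pvAltGo_eq_aux rest.length rest le_rfl pos out

-- ===== VERDICT (by name: the statement is the Claim_ definition above) =====
theorem get_split_characters_spec : Claim_equal_get_split_characters := by
  intro s _
  unfold Spec_get_split_characters get_split_characters get_split_characters_alt
  rw [pvAltGo_eq]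
  simp only [pvSEP_eq, pvSplitOn_eq_pieces, List.nil_append]
  by_cases hlen : (pvPieces s.toList []).length ≠ 1
  · rw [if_pos hlen, pvFoldA]
    simpa using pvPos_zero_eq_pvB (pvPieces s.toList [])
  · rw [if_neg hlen]
    have hlen1 : (pvPieces s.toList []).length = 1 := not_not.mp hlen
    obtain ⟨p, hps⟩ := List.length_eq_one_iff.mp hlen1
    rw [hps]
    simp [pvB]
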